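-- pv_equiv track=rewrite | github.com/R-R-Onzi/TTT_KGE | Phase 2 - Information Gathering/Code Libraries/density_by_GPS.py | coord_type_id
-- ===== SOURCE A (Python) =====
-- from collections import defaultdict
--
-- def coord_type_id(result_csv, df):
--     results = defaultdict(list)
--
--     for key, value in result_csv.items():
--         for place in value:
--             results["id"].append(str(len(results["id"])))
--
--             if (key):
--                 results["name"].append(key)
--             else:
--                 results["name"].append("")
--
--             if ("NaN"  not in place[1]):
--                 results["product_category"].append(place[1])
--             else:
--                 results["product_category"].append("")
--
--             if ("NaN" not in place[2] ):
--                 results["store_name"].append(place[2])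
--             else:
--                 results["store_name"].append("")
--
--             if ("NaN" not in place[0]):
--                 results["points"].append(f"POINT ({place[0]})")
--             else:
--                 results["points"].append("")
--
--     return results
-- ===== SOURCE B (Python) =====
-- from collections import defaultdict
--
-- def coord_type_id(result_csv, df):
--     # Columnar decomposition: flatten the nested dict once, then fill each
--     # output column in its own pass. Appending in loops keeps the defaultdict
--     # key-less when there are no records, exactly like the original.
--     flat = [(k, p) for k, v in result_csv.items() for p in v]
--     results = defaultdict(list)
--     for i, _ in enumerate(flat):
--         results["id"].append(str(i))
--     for k, _ in flat:
--         results["name"].append(k if k else "")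
--     for _, p in flat:
--         results["product_category"].append(p[1] if "NaN" not in p[1] else "")
--     for _, p in flat:
--         results["store_name"].append(p[2] if "NaN" not in p[2] else "")
--     for _, p in flat:
--         results["points"].append(f"POINT ({p[0]})" if "NaN" not in p[0] else "")
--     return results
-- ===== Notes on version B (the rewrite author's own statement) =====
-- stated objective: alternative
-- what changed: A fills all five output columns element-by-element inside one nested loop over the dict; B first flattens the nested dict into one (key, place) list and then builds each output column in its own separate pass (row-wise vs columnar construction).
import Mathlib
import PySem

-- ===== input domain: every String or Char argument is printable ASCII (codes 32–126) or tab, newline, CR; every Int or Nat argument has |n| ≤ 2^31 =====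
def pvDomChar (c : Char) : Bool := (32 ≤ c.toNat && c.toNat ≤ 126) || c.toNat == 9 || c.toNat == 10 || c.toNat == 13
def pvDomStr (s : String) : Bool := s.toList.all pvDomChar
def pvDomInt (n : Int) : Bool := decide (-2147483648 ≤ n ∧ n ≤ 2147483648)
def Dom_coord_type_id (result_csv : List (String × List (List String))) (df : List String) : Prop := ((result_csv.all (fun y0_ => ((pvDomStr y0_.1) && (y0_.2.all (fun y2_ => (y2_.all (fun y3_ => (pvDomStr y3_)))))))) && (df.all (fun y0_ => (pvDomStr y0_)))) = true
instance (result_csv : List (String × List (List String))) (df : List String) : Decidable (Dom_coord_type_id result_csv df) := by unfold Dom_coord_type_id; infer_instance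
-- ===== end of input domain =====

-- B builds the record columnar-wise (flatten once, one pass per output column) instead of
-- A's row-wise nested loop; same return value, equivalence is about the return value only.

-- ===== PORT A =====
-- One body of A's inner loop. 'results["id"].append(str(len(results["id"])))' reads the
-- current list and appends in one defaultdict access; Dict.modify k [] f is exactly
-- 'results[k] = f(results.get(k, []))' with defaultdict key-creation order preserved.
def pyAStep (results : PySem.Dict String (List String)) (key : String) (place : List String) : PySem.Dict String (List String) :=
  let results := results.modify "id" [] (fun l => l ++ [PySem.Int.toStr (l.length : Int)])
  let results := if key ≠ "" then results.modify "name" [] (· ++ [key])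
                 else results.modify "name" [] (· ++ [""])
  -- place[1], place[2], place[0] are total under Pre_ (every place has length ≥ 3)
  let results := if ¬ PySem.Str.isIn "NaN" (PySem.List.pyGetD place 1 "") then
                   results.modify "product_category" [] (· ++ [PySem.List.pyGetD place 1 ""])
                 else results.modify "product_category" [] (· ++ [""])
  let results := if ¬ PySem.Str.isIn "NaN" (PySem.List.pyGetD place 2 "") then
                   results.modify "store_name" [] (· ++ [PySem.List.pyGetD place 2 ""])
                 else results.modify "store_name" [] (· ++ [""])
  let results := if ¬ PySem.Str.isIn "NaN" (PySem.List.pyGetD place 0 "") then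
                   results.modify "points" [] (· ++ ["POINT (" ++ PySem.List.pyGetD place 0 "" ++ ")"])
                 else results.modify "points" [] (· ++ [""])
  results

def coord_type_id (result_csv : List (String × List (List String))) (df : List String) : List (String × List String) :=
  (result_csv.foldl
    (fun results kv => kv.2.foldl (fun results place => pyAStep results kv.1 place) results)
    PySem.Dict.empty).items

-- ===== PORT B =====
-- helper for B's conditional expressions 'p[i] if "NaN" not in p[i] else ""'
def pyNaNCol (s : String) : String := if ¬ PySem.Str.isIn "NaN" s then s else ""

def coord_type_id_alt (result_csv : List (String × List (List String))) (df : List String) : List (String × List String) :=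
  let flat := result_csv.flatMap (fun kv => kv.2.map (fun p => (kv.1, p)))
  let d : PySem.Dict String (List String) := PySem.Dict.empty
  let d := (PySem.List.enumerate flat).foldl (fun d ip => d.modify "id" [] (· ++ [PySem.Int.toStr ip.1])) d
  let d := flat.foldl (fun d kp => d.modify "name" [] (· ++ [if kp.1 ≠ "" then kp.1 else ""])) d
  let d := flat.foldl (fun d kp => d.modify "product_category" [] (· ++ [pyNaNCol (PySem.List.pyGetD kp.2 1 "")])) d
  let d := flat.foldl (fun d kp => d.modify "store_name" [] (· ++ [pyNaNCol (PySem.List.pyGetD kp.2 2 "")])) d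
  let d := flat.foldl (fun d kp => d.modify "points" []
            (· ++ [if ¬ PySem.Str.isIn "NaN" (PySem.List.pyGetD kp.2 0 "") then
                     "POINT (" ++ PySem.List.pyGetD kp.2 0 "" ++ ")" else ""])) d
  d.items

-- ===== PRECONDITION & SPEC =====
-- Pre_ excludes inputs where Python A raises IndexError (a place with fewer than 3 fields),
-- and duplicate top-level keys, which cannot occur in the Python dict result_csv comes from.
def Pre_coord_type_id (result_csv : List (String × List (List String))) (df : List String) : Prop :=
  (result_csv.map Prod.fst).Nodup ∧ ∀ kv ∈ result_csv, ∀ place ∈ kv.2, 3 ≤ place.length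
instance (result_csv : List (String × List (List String))) (df : List String) : Decidable (Pre_coord_type_id result_csv df) := by unfold Pre_coord_type_id; infer_instance
def pvWitness_coord_type_id : (List (String × List (List String))) × List String :=
  ([("k", [["1 2", "cat", "shop"], ["NaN", "NaN", "NaN"]]), ("", [["3 4", "c", "s"]])], ["h"])

def Spec_coord_type_id (result_csv : List (String × List (List String))) (df : List String) (out : List (String × List String)) : Prop := out = coord_type_id_alt result_csv df
instance (result_csv : List (String × List (List String))) (df : List String) (out : List (String × List String)) : Decidable (Spec_coord_type_id result_csv df out) := by unfold Spec_coord_type_id; infer_instance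

-- ===== CLAIM (what is proved, stated in full; the proofs are below) =====
def Claim_equal_coord_type_id : Prop := ∀ (result_csv : List (String × List (List String))) (df : List String), Dom_coord_type_id result_csv df → Pre_coord_type_id result_csv df → Spec_coord_type_id result_csv df (coord_type_id result_csv df)

-- ===== LEMMAS AND PROOFS =====

-- the five output columns as functions of one flat (key, place) record
def nmF (kp : String × List String) : String := if kp.1 ≠ "" then kp.1 else ""
def pcG (kp : String × List String) : String := pyNaNCol (PySem.List.pyGetD kp.2 1 "")
def snG (kp : String × List String) : String := pyNaNCol (PySem.List.pyGetD kp.2 2 "")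
def ptG (kp : String × List String) : String :=
  if ¬ PySem.Str.isIn "NaN" (PySem.List.pyGetD kp.2 0 "") then
    "POINT (" ++ PySem.List.pyGetD kp.2 0 "" ++ ")" else ""
def idCol (n : Int) : List (String × List String) → List String
  | [] => []
  | _ :: t => PySem.Int.toStr n :: idCol (n + 1) t

-- A's nested loop is the flat loop over the flattened records
theorem afold_flat (rc : List (String × List (List String))) (d : PySem.Dict String (List String)) :
    rc.foldl (fun results kv => kv.2.foldl (fun results place => pyAStep results kv.1 place) results) d
      = (rc.flatMap (fun kv => kv.2.map (fun p => (kv.1, p)))).foldl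
          (fun results kp => pyAStep results kp.1 kp.2) d := by
  induction rc generalizing d with
  | nil => rfl
  | cons kv t ih => simp [List.flatMap_cons, List.foldl_append, List.foldl_map, ih]

theorem pyAStep_eq (d : PySem.Dict String (List String)) (kp : String × List String) :
    pyAStep d kp.1 kp.2
      = ((((d.modify "id" [] (fun l => l ++ [PySem.Int.toStr (l.length : Int)])).modify
            "name" [] (· ++ [nmF kp])).modify
            "product_category" [] (· ++ [pcG kp])).modify
            "store_name" [] (· ++ [snG kp])).modify
            "points" [] (· ++ [ptG kp]) := by
  unfold pyAStep nmF pcG snG ptG pyNaNCol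
  split_ifs <;> rfl

theorem pyAStep_empty (kp : String × List String) :
    pyAStep PySem.Dict.empty kp.1 kp.2
      = PySem.Dict.mk [("id", [PySem.Int.toStr 0]), ("name", [nmF kp]),
          ("product_category", [pcG kp]), ("store_name", [snG kp]), ("points", [ptG kp])] := by
  rw [pyAStep_eq]
  have h1 : (PySem.Dict.empty : PySem.Dict String (List String)).modify "id" []
        (fun l => l ++ [PySem.Int.toStr (l.length : Int)])
      = PySem.Dict.mk [("id", [PySem.Int.toStr 0])] := by
    simp [PySem.Dict.modify, PySem.Dict.getD, PySem.Dict.get?, PySem.Dict.insert,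
      PySem.Dict.contains, PySem.Dict.empty]
  have h2 : (PySem.Dict.mk [("id", [PySem.Int.toStr 0])]).modify "name" [] (· ++ [nmF kp])
      = PySem.Dict.mk [("id", [PySem.Int.toStr 0]), ("name", [nmF kp])] := by
    simp [PySem.Dict.modify, PySem.Dict.getD, PySem.Dict.get?, PySem.Dict.insert,
      PySem.Dict.contains]
  have h3 : (PySem.Dict.mk [("id", [PySem.Int.toStr 0]), ("name", [nmF kp])]).modify
        "product_category" [] (· ++ [pcG kp])
      = PySem.Dict.mk [("id", [PySem.Int.toStr 0]), ("name", [nmF kp]),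
          ("product_category", [pcG kp])] := by
    simp [PySem.Dict.modify, PySem.Dict.getD, PySem.Dict.get?, PySem.Dict.insert,
      PySem.Dict.contains]
  have h4 : (PySem.Dict.mk [("id", [PySem.Int.toStr 0]), ("name", [nmF kp]),
          ("product_category", [pcG kp])]).modify "store_name" [] (· ++ [snG kp])
      = PySem.Dict.mk [("id", [PySem.Int.toStr 0]), ("name", [nmF kp]),
          ("product_category", [pcG kp]), ("store_name", [snG kp])] := by
    simp [PySem.Dict.modify, PySem.Dict.getD, PySem.Dict.get?, PySem.Dict.insert,
      PySem.Dict.contains]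
  have h5 : (PySem.Dict.mk [("id", [PySem.Int.toStr 0]), ("name", [nmF kp]),
          ("product_category", [pcG kp]), ("store_name", [snG kp])]).modify
        "points" [] (· ++ [ptG kp])
      = PySem.Dict.mk [("id", [PySem.Int.toStr 0]), ("name", [nmF kp]),
          ("product_category", [pcG kp]), ("store_name", [snG kp]), ("points", [ptG kp])] := by
    simp [PySem.Dict.modify, PySem.Dict.getD, PySem.Dict.get?, PySem.Dict.insert,
      PySem.Dict.contains]
  rw [h1, h2, h3, h4, h5]

theorem pyAStep_full (kp : String × List String) (a b c d e : List String) :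
    pyAStep (PySem.Dict.mk [("id", a), ("name", b), ("product_category", c),
        ("store_name", d), ("points", e)]) kp.1 kp.2
      = PySem.Dict.mk [("id", a ++ [PySem.Int.toStr (a.length : Int)]), ("name", b ++ [nmF kp]),
          ("product_category", c ++ [pcG kp]), ("store_name", d ++ [snG kp]),
          ("points", e ++ [ptG kp])] := by
  rw [pyAStep_eq]
  have h1 : (PySem.Dict.mk [("id", a), ("name", b), ("product_category", c),
          ("store_name", d), ("points", e)]).modify "id" []
        (fun l => l ++ [PySem.Int.toStr (l.length : Int)])
      = PySem.Dict.mk [("id", a ++ [PySem.Int.toStr (a.length : Int)]), ("name", b),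
          ("product_category", c), ("store_name", d), ("points", e)] := by
    simp [PySem.Dict.modify, PySem.Dict.getD, PySem.Dict.get?, PySem.Dict.insert,
      PySem.Dict.contains]
  have h2 : (PySem.Dict.mk [("id", a ++ [PySem.Int.toStr (a.length : Int)]), ("name", b),
          ("product_category", c), ("store_name", d), ("points", e)]).modify
        "name" [] (· ++ [nmF kp])
      = PySem.Dict.mk [("id", a ++ [PySem.Int.toStr (a.length : Int)]), ("name", b ++ [nmF kp]),
          ("product_category", c), ("store_name", d), ("points", e)] := by
    simp [PySem.Dict.modify, PySem.Dict.getD, PySem.Dict.get?, PySem.Dict.insert,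
      PySem.Dict.contains]
  have h3 : (PySem.Dict.mk [("id", a ++ [PySem.Int.toStr (a.length : Int)]),
          ("name", b ++ [nmF kp]), ("product_category", c), ("store_name", d),
          ("points", e)]).modify "product_category" [] (· ++ [pcG kp])
      = PySem.Dict.mk [("id", a ++ [PySem.Int.toStr (a.length : Int)]), ("name", b ++ [nmF kp]),
          ("product_category", c ++ [pcG kp]), ("store_name", d), ("points", e)] := by
    simp [PySem.Dict.modify, PySem.Dict.getD, PySem.Dict.get?, PySem.Dict.insert,
      PySem.Dict.contains]
  have h4 : (PySem.Dict.mk [("id", a ++ [PySem.Int.toStr (a.length : Int)]),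
          ("name", b ++ [nmF kp]), ("product_category", c ++ [pcG kp]), ("store_name", d),
          ("points", e)]).modify "store_name" [] (· ++ [snG kp])
      = PySem.Dict.mk [("id", a ++ [PySem.Int.toStr (a.length : Int)]), ("name", b ++ [nmF kp]),
          ("product_category", c ++ [pcG kp]), ("store_name", d ++ [snG kp]), ("points", e)] := by
    simp [PySem.Dict.modify, PySem.Dict.getD, PySem.Dict.get?, PySem.Dict.insert,
      PySem.Dict.contains]
  have h5 : (PySem.Dict.mk [("id", a ++ [PySem.Int.toStr (a.length : Int)]),
          ("name", b ++ [nmF kp]), ("product_category", c ++ [pcG kp]),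
          ("store_name", d ++ [snG kp]), ("points", e)]).modify "points" [] (· ++ [ptG kp])
      = PySem.Dict.mk [("id", a ++ [PySem.Int.toStr (a.length : Int)]), ("name", b ++ [nmF kp]),
          ("product_category", c ++ [pcG kp]), ("store_name", d ++ [snG kp]),
          ("points", e ++ [ptG kp])] := by
    simp [PySem.Dict.modify, PySem.Dict.getD, PySem.Dict.get?, PySem.Dict.insert,
      PySem.Dict.contains]
  rw [h1, h2, h3, h4, h5]

theorem afold_inv (l : List (String × List String)) (a b c d e : List String) :
    l.foldl (fun results kp => pyAStep results kp.1 kp.2)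
        (PySem.Dict.mk [("id", a), ("name", b), ("product_category", c),
          ("store_name", d), ("points", e)])
      = PySem.Dict.mk [("id", a ++ idCol (a.length : Int) l), ("name", b ++ l.map nmF),
          ("product_category", c ++ l.map pcG), ("store_name", d ++ l.map snG),
          ("points", e ++ l.map ptG)] := by
  induction l generalizing a b c d e with
  | nil => simp [idCol]
  | cons x t ih =>
    rw [List.foldl_cons, pyAStep_full, ih]
    simp [idCol, List.append_assoc]

-- B-side: each column fold, creation step then accumulation
theorem bfold_id (t : List (String × List String)) (n : Int) (a : List String) :
    (PySem.List.enumerate t n).foldl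
        (fun d ip => d.modify "id" [] (· ++ [PySem.Int.toStr ip.1]))
        (PySem.Dict.mk [("id", a)])
      = PySem.Dict.mk [("id", a ++ idCol n t)] := by
  induction t generalizing n a with
  | nil => simp [PySem.List.enumerate_nil, idCol]
  | cons x t ih =>
    rw [PySem.List.enumerate_cons, List.foldl_cons]
    have h1 : (PySem.Dict.mk [("id", a)]).modify "id" [] (· ++ [PySem.Int.toStr n])
        = PySem.Dict.mk [("id", a ++ [PySem.Int.toStr n])] := by
      simp [PySem.Dict.modify, PySem.Dict.getD, PySem.Dict.get?, PySem.Dict.insert,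
        PySem.Dict.contains]
    rw [h1, ih]
    simp [idCol]

theorem bfold_name (t : List (String × List String)) (ids b : List String) :
    t.foldl (fun d kp => d.modify "name" [] (· ++ [if kp.1 ≠ "" then kp.1 else ""]))
        (PySem.Dict.mk [("id", ids), ("name", b)])
      = PySem.Dict.mk [("id", ids), ("name", b ++ t.map nmF)] := by
  induction t generalizing b with
  | nil => simp
  | cons x t ih =>
    rw [List.foldl_cons]
    have h1 : (PySem.Dict.mk [("id", ids), ("name", b)]).modify "name" []
          (· ++ [if x.1 ≠ "" then x.1 else ""])
        = PySem.Dict.mk [("id", ids), ("name", b ++ [nmF x])] := by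
      simp [PySem.Dict.modify, PySem.Dict.getD, PySem.Dict.get?, PySem.Dict.insert,
        PySem.Dict.contains, nmF]
    rw [h1, ih]; simp

theorem bfold_pc (t : List (String × List String)) (ids nm c : List String) :
    t.foldl (fun d kp => d.modify "product_category" []
          (· ++ [pyNaNCol (PySem.List.pyGetD kp.2 1 "")]))
        (PySem.Dict.mk [("id", ids), ("name", nm), ("product_category", c)])
      = PySem.Dict.mk [("id", ids), ("name", nm), ("product_category", c ++ t.map pcG)] := by
  induction t generalizing c with
  | nil => simp
  | cons x t ih =>
    rw [List.foldl_cons]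
    have h1 : (PySem.Dict.mk [("id", ids), ("name", nm), ("product_category", c)]).modify
          "product_category" [] (· ++ [pyNaNCol (PySem.List.pyGetD x.2 1 "")])
        = PySem.Dict.mk [("id", ids), ("name", nm), ("product_category", c ++ [pcG x])] := by
      simp [PySem.Dict.modify, PySem.Dict.getD, PySem.Dict.get?, PySem.Dict.insert,
        PySem.Dict.contains, pcG]
    rw [h1, ih]; simp

theorem bfold_sn (t : List (String × List String)) (ids nm pc d0 : List String) :
    t.foldl (fun d kp => d.modify "store_name" []
          (· ++ [pyNaNCol (PySem.List.pyGetD kp.2 2 "")]))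
        (PySem.Dict.mk [("id", ids), ("name", nm), ("product_category", pc), ("store_name", d0)])
      = PySem.Dict.mk [("id", ids), ("name", nm), ("product_category", pc),
          ("store_name", d0 ++ t.map snG)] := by
  induction t generalizing d0 with
  | nil => simp
  | cons x t ih =>
    rw [List.foldl_cons]
    have h1 : (PySem.Dict.mk [("id", ids), ("name", nm), ("product_category", pc),
            ("store_name", d0)]).modify "store_name" []
          (· ++ [pyNaNCol (PySem.List.pyGetD x.2 2 "")])
        = PySem.Dict.mk [("id", ids), ("name", nm), ("product_category", pc),
            ("store_name", d0 ++ [snG x])] := by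
      simp [PySem.Dict.modify, PySem.Dict.getD, PySem.Dict.get?, PySem.Dict.insert,
        PySem.Dict.contains, snG]
    rw [h1, ih]; simp

theorem bfold_pt (t : List (String × List String)) (ids nm pc sn e : List String) :
    t.foldl (fun d kp => d.modify "points" []
          (· ++ [if ¬ PySem.Str.isIn "NaN" (PySem.List.pyGetD kp.2 0 "") then
                   "POINT (" ++ PySem.List.pyGetD kp.2 0 "" ++ ")" else ""]))
        (PySem.Dict.mk [("id", ids), ("name", nm), ("product_category", pc),
          ("store_name", sn), ("points", e)])
      = PySem.Dict.mk [("id", ids), ("name", nm), ("product_category", pc),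
          ("store_name", sn), ("points", e ++ t.map ptG)] := by
  induction t generalizing e with
  | nil => simp
  | cons x t ih =>
    rw [List.foldl_cons]
    have h1 : (PySem.Dict.mk [("id", ids), ("name", nm), ("product_category", pc),
            ("store_name", sn), ("points", e)]).modify "points" []
          (· ++ [if ¬ PySem.Str.isIn "NaN" (PySem.List.pyGetD x.2 0 "") then
                   "POINT (" ++ PySem.List.pyGetD x.2 0 "" ++ ")" else ""])
        = PySem.Dict.mk [("id", ids), ("name", nm), ("product_category", pc),
            ("store_name", sn), ("points", e ++ [ptG x])] := by
      simp [PySem.Dict.modify, PySem.Dict.getD, PySem.Dict.get?, PySem.Dict.insert,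
        PySem.Dict.contains, ptG]
    rw [h1, ih]; simp

theorem coord_type_id_spec : Claim_equal_coord_type_id := by
  intro rc df _hdom _hpre
  unfold Spec_coord_type_id coord_type_id coord_type_id_alt
  dsimp only
  rw [afold_flat]
  cases hf : rc.flatMap (fun kv => kv.2.map (fun p => (kv.1, p))) with
  | nil => rfl
  | cons x t =>
    simp only [List.foldl_cons, PySem.List.enumerate_cons]
    rw [pyAStep_empty, afold_inv]
    have hid : List.foldl (fun d ip => d.modify "id" [] fun l => l ++ [PySem.Int.toStr ip.1])
          ((PySem.Dict.empty : PySem.Dict String (List String)).modify "id" []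
            fun l => l ++ [PySem.Int.toStr (0, x).1])
          (PySem.List.enumerate t (0 + 1))
        = PySem.Dict.mk [("id", PySem.Int.toStr 0 :: idCol 1 t)] := by
      have hB0 : ((PySem.Dict.empty : PySem.Dict String (List String)).modify "id" []
            fun l => l ++ [PySem.Int.toStr (0, x).1])
          = PySem.Dict.mk [("id", [PySem.Int.toStr 0])] := by
        simp [PySem.Dict.modify, PySem.Dict.getD, PySem.Dict.get?, PySem.Dict.insert,
          PySem.Dict.contains, PySem.Dict.empty]
      rw [hB0, bfold_id]
      simp
    rw [hid]
    have hn0 : ∀ ids : List String,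
        ((PySem.Dict.mk [("id", ids)]).modify "name" []
          fun l => l ++ [if x.1 ≠ "" then x.1 else ""])
        = PySem.Dict.mk [("id", ids), ("name", [nmF x])] := by
      intro ids
      simp [PySem.Dict.modify, PySem.Dict.getD, PySem.Dict.get?, PySem.Dict.insert,
        PySem.Dict.contains, nmF]
    rw [hn0, bfold_name]
    have hpc0 : ∀ ids nm : List String,
        ((PySem.Dict.mk [("id", ids), ("name", nm)]).modify "product_category" []
          fun l => l ++ [pyNaNCol (PySem.List.pyGetD x.2 1 "")])
        = PySem.Dict.mk [("id", ids), ("name", nm), ("product_category", [pcG x])] := by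
      intro ids nm
      simp [PySem.Dict.modify, PySem.Dict.getD, PySem.Dict.get?, PySem.Dict.insert,
        PySem.Dict.contains, pcG]
    rw [hpc0, bfold_pc]
    have hsn0 : ∀ ids nm pc : List String,
        ((PySem.Dict.mk [("id", ids), ("name", nm), ("product_category", pc)]).modify
          "store_name" [] fun l => l ++ [pyNaNCol (PySem.List.pyGetD x.2 2 "")])
        = PySem.Dict.mk [("id", ids), ("name", nm), ("product_category", pc),
            ("store_name", [snG x])] := by
      intro ids nm pc
      simp [PySem.Dict.modify, PySem.Dict.getD, PySem.Dict.get?, PySem.Dict.insert,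
        PySem.Dict.contains, snG]
    rw [hsn0, bfold_sn]
    have hpt0 : ∀ ids nm pc sn : List String,
        ((PySem.Dict.mk [("id", ids), ("name", nm), ("product_category", pc),
            ("store_name", sn)]).modify "points" []
          fun l => l ++ [if ¬ PySem.Str.isIn "NaN" (PySem.List.pyGetD x.2 0 "") then
                           "POINT (" ++ PySem.List.pyGetD x.2 0 "" ++ ")" else ""])
        = PySem.Dict.mk [("id", ids), ("name", nm), ("product_category", pc),
            ("store_name", sn), ("points", [ptG x])] := by
      intro ids nm pc sn
      simp [PySem.Dict.modify, PySem.Dict.getD, PySem.Dict.get?, PySem.Dict.insert,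
        PySem.Dict.contains, ptG]
    rw [hpt0, bfold_pt]
    simp
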